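-- pv_equiv track=rewrite | github.com/pttismylp/meng_yi_chen | Project3/3_.py | padding
-- ===== SOURCE A (Python) =====
-- def padding(str):
--     n = len(str)
--     k = 0
--     while((n + 1 + k) % 512 != 448):
--         k += 1
--         str += '0'
--     llen = bin(n)[2:]
--     llength = len(llen)
--     for i in range(64 - llength+1):
--         llen = '0' + llen
--     str = str + llen
--     return str
-- ===== SOURCE B (Python) =====
-- def padding(str):
--     n = len(str)
--     k = (448 - (n + 1)) % 512
--     return str + '0' * k + bin(n)[2:].zfill(65)
-- ===== Notes on version B (the rewrite author's own statement) =====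
-- stated objective: simpler
-- what changed: Replaced A's counting while-loop by the closed-form modular count of pad zeros appended in one string-repeat, and A's character-prepend loop by zfill(65); B is a loop-free one-liner.
import Mathlib
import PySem

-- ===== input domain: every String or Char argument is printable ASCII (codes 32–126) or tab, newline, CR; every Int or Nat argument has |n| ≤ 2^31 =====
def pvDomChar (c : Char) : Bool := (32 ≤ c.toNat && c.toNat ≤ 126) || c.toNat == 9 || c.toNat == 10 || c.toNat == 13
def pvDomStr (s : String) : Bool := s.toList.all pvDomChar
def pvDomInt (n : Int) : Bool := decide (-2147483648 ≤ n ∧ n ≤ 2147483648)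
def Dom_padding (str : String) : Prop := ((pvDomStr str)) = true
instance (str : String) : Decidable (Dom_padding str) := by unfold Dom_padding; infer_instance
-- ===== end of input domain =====

-- B replaces A's two loops by the closed forms (448 - (n+1)) % 512 zeros and zfill(65): simpler, loop-free.

-- ===== PORT A =====
-- A's while loop: k += 1; str += '0' until (n+1+k) % 512 == 448.  The fuel argument only
-- makes the recursion structural: the Python loop always stops within 512 steps (proved in
-- padLoopA_eq below), so the fuel never runs out on the calls `padding` makes.
def padLoopA (n k : Nat) (cs : List Char) : Nat → List Char
  | 0 => cs
  | fuel+1 => if (n + 1 + k) % 512 ≠ 448 then padLoopA n (k+1) (cs ++ ['0']) fuel else cs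

def padding (str : String) : String :=
  let cs := str.toList
  let n := cs.length
  let cs := padLoopA n 0 cs 512
  let llen := PySem.List.slice (PySem.Int.toBinChars0b (n : Int)) (some 2) none  -- bin(n)[2:]
  let llength := llen.length
  -- for i in range(64 - llength + 1): llen = '0' + llen
  let llen := (PySem.List.pyRange 0 (64 - (llength : Int) + 1)).foldl (fun l _ => '0' :: l) llen
  String.ofList (cs ++ llen)

-- ===== PORT B =====
def padding_alt (str : String) : String :=
  let cs := str.toList
  let n := cs.length
  let k := (PySem.Int.mod (448 - ((n : Int) + 1)) 512).toNat
  String.ofList (cs ++ List.replicate k '0'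
    ++ PySem.Chars.zfill (PySem.List.slice (PySem.Int.toBinChars0b (n : Int)) (some 2) none) 65)

-- ===== PRECONDITION & SPEC =====
def Spec_padding (str : String) (out : String) : Prop := out = padding_alt str
instance (str : String) (out : String) : Decidable (Spec_padding str out) := by unfold Spec_padding; infer_instance

-- ===== CLAIM (what is proved, stated in full; the proofs are below) =====
def Claim_equal_padding : Prop := ∀ (str : String), Dom_padding str → Spec_padding str (padding str)

-- ===== LEMMAS AND PROOFS =====

-- number of zeros A's while loop still appends from counter k
def padCount (n k : Nat) : Nat := (448 + 512 - (n + 1 + k) % 512) % 512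

theorem padLoopA_eq (fuel : Nat) : ∀ (n k : Nat) (cs : List Char), padCount n k ≤ fuel →
    padLoopA n k cs fuel = cs ++ List.replicate (padCount n k) '0' := by
  induction fuel with
  | zero =>
    intro n k cs h
    have h0 : padCount n k = 0 := Nat.le_zero.mp h
    simp [padLoopA, h0]
  | succ fuel ih =>
    intro n k cs h
    by_cases hg : (n + 1 + k) % 512 = 448
    · have h0 : padCount n k = 0 := by unfold padCount; omega
      simp [padLoopA, hg, h0]
    · have hstep : padCount n (k + 1) + 1 = padCount n k := by unfold padCount; omega
      have hle : padCount n (k + 1) ≤ fuel := by omega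
      simp only [padLoopA, if_pos hg]
      rw [ih n (k+1) (cs ++ ['0']) hle, ← hstep]
      simp [List.replicate_succ]

theorem padCount_lt (n : Nat) : padCount n 0 < 512 := by
  unfold padCount; omega

-- B's closed form (448 - (n+1)) % 512 computes exactly the loop's zero count
theorem padCount_closed (n : Nat) :
    (PySem.Int.mod (448 - ((n : Int) + 1)) 512).toNat = padCount n 0 := by
  rw [PySem.Int.mod_eq_emod_of_pos (by norm_num)]
  unfold padCount
  omega

-- prepending '0' once per element of a list = prepending `length` zeros
theorem foldl_prepend_zero (l : List Int) : ∀ (acc : List Char),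
    l.foldl (fun a _ => '0' :: a) acc = List.replicate l.length '0' ++ acc := by
  induction l with
  | nil => intro acc; simp
  | cons x xs ih =>
    intro acc
    simp only [List.foldl_cons, List.length_cons, ih]
    rw [List.replicate_succ']
    simp

-- A's prepend loop over range(64 - llength + 1) equals zfill(65) on bin(n)[2:] (n : Nat)
theorem prepend_eq_zfill (n : Nat) :
    (PySem.List.pyRange 0 (64 - (((PySem.List.slice (PySem.Int.toBinChars0b (n : Int)) (some 2) none).length : Int)) + 1)).foldl
        (fun l _ => '0' :: l) (PySem.List.slice (PySem.Int.toBinChars0b (n : Int)) (some 2) none)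
      = PySem.Chars.zfill (PySem.List.slice (PySem.Int.toBinChars0b (n : Int)) (some 2) none) 65 := by
  have hb : PySem.List.slice (PySem.Int.toBinChars0b (n : Int)) (some 2) none
      = Nat.toDigits 2 n := by
    have h : ¬((n : Int) < 0) := by omega
    simp [PySem.Int.toBinChars0b, PySem.List.slice, h]
  rw [hb]
  set ds := Nat.toDigits 2 n with hds
  have hpos : 0 < ds.length := Nat.length_toDigits_pos
  rw [foldl_prepend_zero, PySem.List.length_pyRange_one]
  by_cases hL : 65 ≤ ds.length
  · have h0 : ((64 : Int) - ds.length + 1 - 0).toNat = 0 := by omega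
    rw [h0]
    simp only [List.replicate_zero, List.nil_append, PySem.Chars.zfill]
    rw [if_pos (by omega)]
  · have h0 : ((64 : Int) - ds.length + 1 - 0).toNat = 65 - ds.length := by omega
    rw [h0]
    obtain ⟨c, rest, hcr⟩ : ∃ c rest, ds = c :: rest := by
      cases hdsx : ds with
      | nil => rw [hdsx] at hpos; simp at hpos
      | cons c rest => exact ⟨c, rest, rfl⟩
    have hcmem : c ∈ ds := by rw [hcr]; exact List.mem_cons_self
    have hdig : c.isDigit = true :=
      Nat.isDigit_of_mem_toDigits (by norm_num) (by norm_num) (hds ▸ hcmem)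
    have hnc : ¬ (c = '+' ∨ c = '-') := by
      rintro (rfl | rfl) <;> simp [Char.isDigit] at hdig
    have hlen : (c :: rest).length = ds.length := by rw [hcr]
    rw [hcr]
    simp only [PySem.Chars.zfill]
    rw [if_neg (by omega), if_neg hnc]
    simp [← hcr]

-- ===== VERDICT (by name: the statement is the Claim_ definition above) =====
theorem padding_spec : Claim_equal_padding := by
  intro str _
  unfold Spec_padding padding padding_alt
  simp only
  rw [padLoopA_eq 512 _ 0 _ (Nat.le_of_lt (padCount_lt _)), padCount_closed,
    prepend_eq_zfill]
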